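-- pv_equiv track=rewrite | github.com/tomy0000000/online-judge | leetcode/2257-count-unguarded-cells-in-the-grid/linear.py | countUnguarded
-- ===== SOURCE A (Python) =====
-- def countUnguarded(
--     m: int, n: int, guards: list[list[int]], walls: list[list[int]]
-- ) -> int:
--     blocks = [["" for _ in range(n)] for _ in range(m)]
--
--     for i, j in walls:
--         blocks[i][j] = "W"
--     for i, j in guards:
--         blocks[i][j] = "G"
--
--     for i, j in guards:
--         for ii in range(i - 1, -1, -1):
--             if blocks[ii][j] in ("W", "G"):
--                 break
--             blocks[ii][j] = "X"
--
--         for ii in range(i + 1, m):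
--             if blocks[ii][j] in ("W", "G"):
--                 break
--             blocks[ii][j] = "X"
--
--         for jj in range(j - 1, -1, -1):
--             if blocks[i][jj] in ("W", "G"):
--                 break
--             blocks[i][jj] = "X"
--
--         for jj in range(j + 1, n):
--             if blocks[i][jj] in ("W", "G"):
--                 break
--             blocks[i][jj] = "X"
--
--     return sum(row.count("") for row in blocks)
-- ===== SOURCE B (Python) =====
-- def countUnguarded(
--     m: int, n: int, guards: list[list[int]], walls: list[list[int]]
-- ) -> int:
--     guardset = {(i, j) for i, j in guards}
--     blocked = {(i, j) for i, j in walls} | guardset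
--
--     def seen(i, j):
--         for gi, gj in guardset:
--             if gi == i and all(
--                 (i, k) not in blocked for k in range(min(gj, j) + 1, max(gj, j))
--             ):
--                 return True
--             if gj == j and all(
--                 (k, j) not in blocked for k in range(min(gi, i) + 1, max(gi, i))
--             ):
--                 return True
--         return False
--
--     return sum(
--         1
--         for i in range(m)
--         for j in range(n)
--         if (i, j) not in blocked and not seen(i, j)
--     )
-- ===== Notes on version B (the rewrite author's own statement) =====
-- stated objective: alternative
-- what changed: B drops the mutable grid and per-guard ray painting entirely: it builds wall/guard coordinate sets once and decides each cell declaratively (unguarded iff not a wall/guard and no guard shares its row or column with a blocker-free segment between them), counting in one comprehension.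
-- outside the precondition, e.g. on countUnguarded(2, 2, [[-2, 0]], []): A returns 1, B returns 2
import Mathlib
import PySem

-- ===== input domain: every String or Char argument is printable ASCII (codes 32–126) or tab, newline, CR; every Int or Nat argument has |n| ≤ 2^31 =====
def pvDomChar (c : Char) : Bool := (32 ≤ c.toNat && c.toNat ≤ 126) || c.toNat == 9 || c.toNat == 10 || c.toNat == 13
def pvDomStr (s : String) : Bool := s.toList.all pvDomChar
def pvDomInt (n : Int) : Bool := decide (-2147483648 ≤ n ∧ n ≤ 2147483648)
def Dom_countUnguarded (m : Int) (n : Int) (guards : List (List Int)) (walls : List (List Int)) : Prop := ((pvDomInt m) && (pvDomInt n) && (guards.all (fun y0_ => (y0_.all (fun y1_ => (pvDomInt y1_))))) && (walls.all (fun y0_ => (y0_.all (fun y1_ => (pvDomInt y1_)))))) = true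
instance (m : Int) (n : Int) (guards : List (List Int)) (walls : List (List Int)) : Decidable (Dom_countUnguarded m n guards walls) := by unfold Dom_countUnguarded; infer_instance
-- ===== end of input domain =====

-- B replaces A's mutable grid and per-guard ray painting by coordinate sets and a
-- declarative per-cell visibility test (objective: alternative, not faster).


-- ===== PORT A =====
-- 2-D read blocks[i][j] / write blocks[i][j] = v; pyGetD/pySetD are exact for the
-- nonnegative in-range indices guaranteed by Pre_countUnguarded.
def pvGet2 (b : List (List String)) (i j : Int) : String :=
  PySem.List.pyGetD (PySem.List.pyGetD b i []) j ""

def pvSet2 (b : List (List String)) (i j : Int) (v : String) : List (List String) :=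
  PySem.List.pySetD b i (PySem.List.pySetD (PySem.List.pyGetD b i []) j v)

-- 'for t in R: if blocks[pos t] in ("W","G"): break; blocks[pos t] = "X"'
-- (all four ray loops of A have exactly this shape; pos fixes the axis)
def pvRay (pos : Int → Int × Int) : List (List String) → List Int → List (List String)
  | b, [] => b
  | b, t :: rest =>
    if pvGet2 b (pos t).1 (pos t).2 = "W" ∨ pvGet2 b (pos t).1 (pos t).2 = "G" then b
    else pvRay pos (pvSet2 b (pos t).1 (pos t).2 "X") rest

-- the body of A's outer 'for i, j in guards' loop: the four rays
def pvGuardRays (m n : Int) (b : List (List String)) (g : List Int) : List (List String) :=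
  let i := PySem.List.pyGetD g 0 0
  let j := PySem.List.pyGetD g 1 0
  let b1 := pvRay (fun ii => (ii, j)) b (PySem.List.pyRange (i - 1) (-1) (-1))
  let b2 := pvRay (fun ii => (ii, j)) b1 (PySem.List.pyRange (i + 1) m 1)
  let b3 := pvRay (fun jj => (i, jj)) b2 (PySem.List.pyRange (j - 1) (-1) (-1))
  pvRay (fun jj => (i, jj)) b3 (PySem.List.pyRange (j + 1) n 1)

def countUnguarded (m : Int) (n : Int) (guards : List (List Int)) (walls : List (List Int)) : Int :=
  let blocks0 : List (List String) :=
    (PySem.List.pyRange 0 m 1).map (fun _ => (PySem.List.pyRange 0 n 1).map (fun _ => ""))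
  let b1 := walls.foldl
    (fun b p => pvSet2 b (PySem.List.pyGetD p 0 0) (PySem.List.pyGetD p 1 0) "W") blocks0
  let b2 := guards.foldl
    (fun b p => pvSet2 b (PySem.List.pyGetD p 0 0) (PySem.List.pyGetD p 1 0) "G") b1
  let b3 := guards.foldl (pvGuardRays m n) b2
  (b3.map (fun row => (PySem.List.count row "" : Int))).sum

-- ===== PORT B =====
-- B keeps no grid at all: coordinate sets built once, then a per-cell declarative test.
def pvPair (p : List Int) : Int × Int := (PySem.List.pyGetD p 0 0, PySem.List.pyGetD p 1 0)

def pvSeen (guardset : PySem.Set (Int × Int)) (blocked : PySem.Set (Int × Int))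
    (i j : Int) : Bool :=
  guardset.any (fun g =>
    (g.1 == i && (PySem.List.pyRange (min g.2 j + 1) (max g.2 j) 1).all
        (fun k => !(PySem.Set.contains blocked (i, k)))) ||
    (g.2 == j && (PySem.List.pyRange (min g.1 i + 1) (max g.1 i) 1).all
        (fun k => !(PySem.Set.contains blocked (k, j)))))

def countUnguarded_alt (m : Int) (n : Int) (guards : List (List Int)) (walls : List (List Int)) : Int :=
  let guardset : PySem.Set (Int × Int) := PySem.Set.ofList (guards.map pvPair)
  let blocked : PySem.Set (Int × Int) :=
    PySem.Set.union (PySem.Set.ofList (walls.map pvPair)) guardset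
  ((PySem.List.pyRange 0 m 1).map (fun i =>
    ((PySem.List.pyRange 0 n 1).map (fun j =>
      if !(PySem.Set.contains blocked (i, j)) && !(pvSeen guardset blocked i j) then (1 : Int)
      else 0)).sum)).sum

-- ===== PRECONDITION & SPEC =====
-- Pre_ excludes rows that are not coordinate pairs of length 2 (Python unpacking 'i, j'
-- raises ValueError) and coordinates outside [0,m)x[0,n): out-of-range ones raise
-- IndexError, negative in-range ones make A paint an accidental grid through Python's
-- negative-index wraparound (see the cite in claim.json).
def Pre_countUnguarded (m : Int) (n : Int) (guards : List (List Int)) (walls : List (List Int)) : Prop :=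
  ∀ p ∈ guards ++ walls,
    p.length = 2 ∧ 0 ≤ PySem.List.pyGetD p 0 0 ∧ PySem.List.pyGetD p 0 0 < m ∧
      0 ≤ PySem.List.pyGetD p 1 0 ∧ PySem.List.pyGetD p 1 0 < n
instance (m : Int) (n : Int) (guards : List (List Int)) (walls : List (List Int)) : Decidable (Pre_countUnguarded m n guards walls) := by unfold Pre_countUnguarded; infer_instance

def pvWitness_countUnguarded : Int × Int × List (List Int) × List (List Int) :=
  (3, 4, [[0, 1], [2, 2]], [[1, 1]])

def Spec_countUnguarded (m : Int) (n : Int) (guards : List (List Int)) (walls : List (List Int)) (out : Int) : Prop := out = countUnguarded_alt m n guards walls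
instance (m : Int) (n : Int) (guards : List (List Int)) (walls : List (List Int)) (out : Int) : Decidable (Spec_countUnguarded m n guards walls out) := by unfold Spec_countUnguarded; infer_instance

-- ===== CLAIM (what is proved, stated in full; the proofs are below) =====
def Claim_equal_countUnguarded : Prop := ∀ (m : Int) (n : Int) (guards : List (List Int)) (walls : List (List Int)), Dom_countUnguarded m n guards walls → Pre_countUnguarded m n guards walls → Spec_countUnguarded m n guards walls (countUnguarded m n guards walls)

-- ===== LEMMAS AND PROOFS =====

-- proof-side view: coordinate pair lists, blockedness, the intended cell value
def pvInR (m i : Int) : Prop := 0 ≤ i ∧ i < m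

def pvBlkB (Wp Gp : List (Int × Int)) (i j : Int) : Bool :=
  decide ((i, j) ∈ Wp) || decide ((i, j) ∈ Gp)

def pvCell (Wp Gp : List (Int × Int)) (S : Int → Int → Bool) (i j : Int) : String :=
  if (i, j) ∈ Gp then "G" else if (i, j) ∈ Wp then "W" else if S i j then "X" else ""

def pvShape (m n : Int) (b : List (List String)) : Prop :=
  b.length = m.toNat ∧ ∀ row ∈ b, row.length = n.toNat

def pvInv (m n : Int) (Wp Gp : List (Int × Int)) (S : Int → Int → Bool)
    (b : List (List String)) : Prop :=
  pvShape m n b ∧ ∀ i j, pvInR m i → pvInR n j → pvGet2 b i j = pvCell Wp Gp S i j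

-- cells painted "X" by one ray along 'pos' over index list L
def pvTW (pos : Int → Int × Int) (Wp Gp : List (Int × Int)) (L : List Int) (i j : Int) : Bool :=
  (L.takeWhile (fun t => !pvBlkB Wp Gp (pos t).1 (pos t).2)).any (fun t => decide (pos t = (i, j)))

-- cells painted by the four rays of one guard
def pvVis (m n : Int) (Wp Gp : List (Int × Int)) (g : Int × Int) (i j : Int) : Bool :=
  pvTW (fun ii => (ii, g.2)) Wp Gp (PySem.List.pyRange (g.1 - 1) (-1) (-1)) i j ||
  pvTW (fun ii => (ii, g.2)) Wp Gp (PySem.List.pyRange (g.1 + 1) m 1) i j ||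
  pvTW (fun jj => (g.1, jj)) Wp Gp (PySem.List.pyRange (g.2 - 1) (-1) (-1)) i j ||
  pvTW (fun jj => (g.1, jj)) Wp Gp (PySem.List.pyRange (g.2 + 1) n 1) i j

lemma pvShape_set2 (m n : Int) (b : List (List String)) (x y : Int) (v : String)
    (hb : pvShape m n b) (hx : pvInR m x) (hy : pvInR n y) : pvShape m n (pvSet2 b x y v) := by
  obtain ⟨hlen, hrow⟩ := hb
  obtain ⟨hx0, hxm⟩ := hx
  obtain ⟨hy0, hyn⟩ := hy
  constructor
  · simp [pvSet2, PySem.List.pySetD_of_nonneg _ _ hx0, hlen]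
  · intro row hmem
    simp only [pvSet2, PySem.List.pySetD_of_nonneg _ _ hx0] at hmem
    rcases List.mem_or_eq_of_mem_set hmem with h | h
    · exact hrow _ h
    · subst h
      rw [PySem.List.pySetD_of_nonneg _ _ hy0, List.length_set]
      apply hrow
      rw [PySem.List.pyGetD_eq_getElem _ _ hx0 (by omega)]
      exact List.getElem_mem _

lemma pvGet2_set2 (m n : Int) (b : List (List String)) (x y i j : Int) (v : String)
    (hb : pvShape m n b) (hx : pvInR m x) (hy : pvInR n y) (hi : pvInR m i) (hj : pvInR n j) :
    pvGet2 (pvSet2 b x y v) i j = if i = x ∧ j = y then v else pvGet2 b i j := by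
  obtain ⟨hlen, hrow⟩ := hb
  obtain ⟨hx0, hxm⟩ := hx
  obtain ⟨hy0, hyn⟩ := hy
  obtain ⟨hi0, him⟩ := hi
  obtain ⟨hj0, hjn⟩ := hj
  have hxlt : (x : Int) < (b.length : Int) := by omega
  have hilt : (i : Int) < (b.length : Int) := by omega
  have hrx : (b[x.toNat]'(by omega)).length = n.toNat :=
    hrow _ (List.getElem_mem _)
  have hri : (b[i.toNat]'(by omega)).length = n.toNat :=
    hrow _ (List.getElem_mem _)
  have hgx : PySem.List.pyGetD b x [] = b[x.toNat]'(by omega) :=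
    PySem.List.pyGetD_eq_getElem _ _ hx0 hxlt
  have hgi : PySem.List.pyGetD b i [] = b[i.toNat]'(by omega) :=
    PySem.List.pyGetD_eq_getElem _ _ hi0 hilt
  have hset : pvSet2 b x y v = b.set x.toNat ((b[x.toNat]'(by omega)).set y.toNat v) := by
    simp [pvSet2, PySem.List.pySetD_of_nonneg _ _ hx0, PySem.List.pySetD_of_nonneg _ _ hy0, hgx]
  simp only [pvGet2, hset]
  rw [PySem.List.pyGetD_eq_getElem (d := ([] : List String)) _ hi0
    (by rw [List.length_set]; omega)]
  rw [List.getElem_set]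
  by_cases hix : x.toNat = i.toNat
  · have hix' : i = x := by omega
    simp only [if_pos hix]
    rw [PySem.List.pyGetD_eq_getElem (d := "") _ hj0 (by rw [List.length_set]; push_cast [hrx]; omega)]
    rw [List.getElem_set]
    by_cases hjy : y.toNat = j.toNat
    · have hjy' : j = y := by omega
      simp [hix', hjy']
    · have hne : ¬ (i = x ∧ j = y) := by omega
      simp only [if_neg hjy, if_neg hne, hgi]
      rw [PySem.List.pyGetD_eq_getElem (d := "") _ hj0 (by push_cast [hri]; omega)]
      have : i.toNat = x.toNat := hix.symm
      simp [this]
  · have hne : ¬ (i = x ∧ j = y) := by omega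
    simp only [if_neg hix, if_neg hne, hgi]

lemma pvInv_congr (m n : Int) (Wp Gp : List (Int × Int)) (S S' : Int → Int → Bool)
    (b : List (List String)) (h : pvInv m n Wp Gp S b)
    (hS : ∀ i j, pvInR m i → pvInR n j → S i j = S' i j) : pvInv m n Wp Gp S' b := by
  refine ⟨h.1, fun i j hi hj => ?_⟩
  rw [h.2 i j hi hj]
  simp [pvCell, hS i j hi hj]

lemma pvInv_blocked (m n : Int) (Wp Gp : List (Int × Int)) (S : Int → Int → Bool)
    (b : List (List String)) (h : pvInv m n Wp Gp S b) (i j : Int)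
    (hi : pvInR m i) (hj : pvInR n j) :
    (pvGet2 b i j = "W" ∨ pvGet2 b i j = "G") ↔ pvBlkB Wp Gp i j = true := by
  rw [h.2 i j hi hj]
  simp only [pvCell, pvBlkB, Bool.or_eq_true, decide_eq_true_eq]
  split_ifs <;> simp_all

-- marking a list of coordinates with a fixed letter, pointwise
lemma pvFoldMark (m n : Int) (ws : List (List Int)) (v : String) (b : List (List String))
    (f : Int → Int → String)
    (hws : ∀ p ∈ ws, pvInR m (pvPair p).1 ∧ pvInR n (pvPair p).2)
    (hb : pvShape m n b)
    (hf : ∀ i j, pvInR m i → pvInR n j → pvGet2 b i j = f i j) :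
    pvShape m n (ws.foldl
        (fun b p => pvSet2 b (PySem.List.pyGetD p 0 0) (PySem.List.pyGetD p 1 0) v) b) ∧
      ∀ i j, pvInR m i → pvInR n j →
        pvGet2 (ws.foldl
          (fun b p => pvSet2 b (PySem.List.pyGetD p 0 0) (PySem.List.pyGetD p 1 0) v) b) i j =
          if (i, j) ∈ ws.map pvPair then v else f i j := by
  induction ws generalizing b f with
  | nil => exact ⟨hb, by simpa using hf⟩
  | cons w rest ih =>
    obtain ⟨hw1, hw2⟩ := hws w (by simp)
    simp only [pvPair] at hw1 hw2
    have hb' : pvShape m n (pvSet2 b (PySem.List.pyGetD w 0 0) (PySem.List.pyGetD w 1 0) v) :=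
      pvShape_set2 m n b _ _ v hb hw1 hw2
    have hf' : ∀ i j, pvInR m i → pvInR n j →
        pvGet2 (pvSet2 b (PySem.List.pyGetD w 0 0) (PySem.List.pyGetD w 1 0) v) i j =
          if (i, j) = pvPair w then v else f i j := by
      intro i j hi hj
      rw [pvGet2_set2 m n b _ _ i j v hb hw1 hw2 hi hj]
      by_cases heq : (i, j) = pvPair w
      · rw [if_pos heq, if_pos (by rw [Prod.ext_iff] at heq; exact ⟨heq.1, heq.2⟩)]
      · rw [if_neg heq, if_neg (by rw [Prod.ext_iff] at heq; tauto), hf i j hi hj]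
    obtain ⟨hsh, hpt⟩ := ih (pvSet2 b _ _ v) _ (fun p hp => hws p (by simp [hp])) hb' hf'
    refine ⟨by simpa using hsh, fun i j hi hj => ?_⟩
    rw [List.foldl_cons, hpt i j hi hj]
    by_cases h1 : (i, j) ∈ rest.map pvPair <;> by_cases h2 : (i, j) = pvPair w <;>
      simp [h1, h2]

-- after building blocks0 and marking walls then guards, the grid is pvCell with no "X"
-- after building blocks0 and marking walls then guards, the grid is pvCell with no "X"
lemma pvInv_init (m n : Int) (guards walls : List (List Int))
    (hpre : Pre_countUnguarded m n guards walls) :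
    pvInv m n (walls.map pvPair) (guards.map pvPair) (fun _ _ => false)
      (guards.foldl
        (fun b p => pvSet2 b (PySem.List.pyGetD p 0 0) (PySem.List.pyGetD p 1 0) "G")
        (walls.foldl
          (fun b p => pvSet2 b (PySem.List.pyGetD p 0 0) (PySem.List.pyGetD p 1 0) "W")
          ((PySem.List.pyRange 0 m 1).map
            (fun _ => (PySem.List.pyRange 0 n 1).map (fun _ => ""))))) := by
  have hguards : ∀ p ∈ guards, pvInR m (pvPair p).1 ∧ pvInR n (pvPair p).2 := by
    intro p hp
    obtain ⟨-, h1, h2, h3, h4⟩ := hpre p (by simp [hp])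
    exact ⟨⟨h1, h2⟩, ⟨h3, h4⟩⟩
  have hwalls : ∀ p ∈ walls, pvInR m (pvPair p).1 ∧ pvInR n (pvPair p).2 := by
    intro p hp
    obtain ⟨-, h1, h2, h3, h4⟩ := hpre p (by simp [hp])
    exact ⟨⟨h1, h2⟩, ⟨h3, h4⟩⟩
  have hsh0 : pvShape m n ((PySem.List.pyRange 0 m 1).map
      (fun _ => (PySem.List.pyRange 0 n 1).map (fun _ => ("" : String)))) := by
    constructor
    · simp [PySem.List.length_pyRange_one]
    · intro row hrow
      simp only [List.mem_map] at hrow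
      obtain ⟨_, -, rfl⟩ := hrow
      simp [PySem.List.length_pyRange_one]
  have hget0 : ∀ i j, pvInR m i → pvInR n j →
      pvGet2 ((PySem.List.pyRange 0 m 1).map
        (fun _ => (PySem.List.pyRange 0 n 1).map (fun _ => ("" : String)))) i j = "" := by
    intro i j hi hj
    obtain ⟨hi0, him⟩ := hi
    obtain ⟨hj0, hjn⟩ := hj
    have h1 : (i : Int) < (((PySem.List.pyRange 0 m 1).map
        (fun _ => (PySem.List.pyRange 0 n 1).map (fun _ => ("" : String)))).length : Int) := by
      simp [PySem.List.length_pyRange_one]; omega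
    rw [pvGet2, PySem.List.pyGetD_eq_getElem _ _ hi0 h1, List.getElem_map]
    rw [PySem.List.pyGetD_eq_getElem _ _ hj0 (by simp [PySem.List.length_pyRange_one]; omega),
      List.getElem_map]
  obtain ⟨hshW, hptW⟩ := pvFoldMark m n walls "W" _ (fun _ _ => "") hwalls hsh0 hget0
  obtain ⟨hshG, hptG⟩ := pvFoldMark m n guards "G" _
    (fun i j => if (i, j) ∈ walls.map pvPair then "W" else "") hguards hshW hptW
  refine ⟨hshG, fun i j hi hj => ?_⟩
  rw [hptG i j hi hj]
  simp [pvCell]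

-- one ray adds exactly its takeWhile prefix to the "X" layer
lemma pvRay_inv (m n : Int) (Wp Gp : List (Int × Int)) (pos : Int → Int × Int)
    (L : List Int) (S : Int → Int → Bool) (b : List (List String))
    (hL : ∀ t ∈ L, pvInR m (pos t).1 ∧ pvInR n (pos t).2)
    (h : pvInv m n Wp Gp S b) :
    pvInv m n Wp Gp (fun i j => S i j || pvTW pos Wp Gp L i j) (pvRay pos b L) := by
  induction L generalizing b S with
  | nil =>
    apply pvInv_congr m n Wp Gp S _ _ h
    intro i j hi hj
    simp [pvTW]
  | cons t rest ih =>
    obtain ⟨hpt1, hpt2⟩ := hL t (by simp)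
    have hL' : ∀ t' ∈ rest, pvInR m (pos t').1 ∧ pvInR n (pos t').2 := by
      intro t' ht'; exact hL t' (by simp [ht'])
    rw [pvRay]
    by_cases hblk : pvBlkB Wp Gp (pos t).1 (pos t).2 = true
    · rw [if_pos ((pvInv_blocked m n Wp Gp S b h _ _ hpt1 hpt2).2 hblk)]
      apply pvInv_congr m n Wp Gp S _ _ h
      intro i j hi hj
      simp [pvTW, hblk]
    · have hnb : ¬ (pvGet2 b (pos t).1 (pos t).2 = "W" ∨ pvGet2 b (pos t).1 (pos t).2 = "G") := by
        rw [pvInv_blocked m n Wp Gp S b h _ _ hpt1 hpt2]; simp [hblk]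
      rw [if_neg hnb]
      have hinv' : pvInv m n Wp Gp (fun i j => S i j || decide (pos t = (i, j)))
          (pvSet2 b (pos t).1 (pos t).2 "X") := by
        refine ⟨pvShape_set2 m n b _ _ _ h.1 hpt1 hpt2, fun i j hi hj => ?_⟩
        rw [pvGet2_set2 m n b _ _ i j _ h.1 hpt1 hpt2 hi hj]
        by_cases heq : pos t = (i, j)
        · have h1 : i = (pos t).1 ∧ j = (pos t).2 := by rw [heq]; exact ⟨rfl, rfl⟩
          rw [if_pos h1]
          simp only [pvCell, pvBlkB, Bool.or_eq_true, decide_eq_true_eq] at hblk ⊢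
          rw [heq] at hblk
          push Not at hblk
          simp [hblk.1, hblk.2, heq]
        · have h1 : ¬ (i = (pos t).1 ∧ j = (pos t).2) := by
            intro ⟨e1, e2⟩; exact heq (by rw [e1, e2])
          rw [if_neg h1, h.2 i j hi hj]
          simp [pvCell, heq]
      have := ih (fun i j => S i j || decide (pos t = (i, j))) _ hL' hinv'
      apply pvInv_congr m n Wp Gp _ _ _ this
      intro i j hi hj
      simp [pvTW, hblk, Bool.or_assoc]

-- one guard's four rays add exactly pvVis
lemma pvGuardRays_inv (m n : Int) (Wp Gp : List (Int × Int)) (g : List Int)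
    (S : Int → Int → Bool) (b : List (List String))
    (hg : pvInR m (pvPair g).1 ∧ pvInR n (pvPair g).2)
    (h : pvInv m n Wp Gp S b) :
    pvInv m n Wp Gp (fun i j => S i j || pvVis m n Wp Gp (pvPair g) i j)
      (pvGuardRays m n b g) := by
  obtain ⟨⟨hg10, hg1m⟩, hg20, hg2n⟩ := hg
  simp only [pvPair] at hg10 hg1m hg20 hg2n
  have h1 := pvRay_inv m n Wp Gp (fun ii => (ii, PySem.List.pyGetD g 1 0))
    (PySem.List.pyRange (PySem.List.pyGetD g 0 0 - 1) (-1) (-1)) S b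
    (by intro t ht
        rw [PySem.List.mem_pyRange_neg_one] at ht
        show pvInR m t ∧ pvInR n (PySem.List.pyGetD g 1 0)
        exact ⟨⟨by omega, by omega⟩, ⟨hg20, hg2n⟩⟩) h
  have h2 := pvRay_inv m n Wp Gp (fun ii => (ii, PySem.List.pyGetD g 1 0))
    (PySem.List.pyRange (PySem.List.pyGetD g 0 0 + 1) m 1) _ _
    (by intro t ht
        rw [PySem.List.mem_pyRange_one] at ht
        show pvInR m t ∧ pvInR n (PySem.List.pyGetD g 1 0)
        exact ⟨⟨by omega, by omega⟩, ⟨hg20, hg2n⟩⟩) h1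
  have h3 := pvRay_inv m n Wp Gp (fun jj => (PySem.List.pyGetD g 0 0, jj))
    (PySem.List.pyRange (PySem.List.pyGetD g 1 0 - 1) (-1) (-1)) _ _
    (by intro t ht
        rw [PySem.List.mem_pyRange_neg_one] at ht
        show pvInR m (PySem.List.pyGetD g 0 0) ∧ pvInR n t
        exact ⟨⟨hg10, hg1m⟩, ⟨by omega, by omega⟩⟩) h2
  have h4 := pvRay_inv m n Wp Gp (fun jj => (PySem.List.pyGetD g 0 0, jj))
    (PySem.List.pyRange (PySem.List.pyGetD g 1 0 + 1) n 1) _ _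
    (by intro t ht
        rw [PySem.List.mem_pyRange_one] at ht
        show pvInR m (PySem.List.pyGetD g 0 0) ∧ pvInR n t
        exact ⟨⟨hg10, hg1m⟩, ⟨by omega, by omega⟩⟩) h3
  apply pvInv_congr m n Wp Gp _ _ _ h4
  intro i j hi hj
  simp [pvVis, pvPair, Bool.or_assoc]

lemma pvFold_inv (m n : Int) (Wp Gp : List (Int × Int)) (gs : List (List Int))
    (S : Int → Int → Bool) (b : List (List String))
    (hgs : ∀ p ∈ gs, pvInR m (pvPair p).1 ∧ pvInR n (pvPair p).2)
    (h : pvInv m n Wp Gp S b) :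
    pvInv m n Wp Gp
      (fun i j => S i j || gs.any (fun p => pvVis m n Wp Gp (pvPair p) i j))
      (gs.foldl (pvGuardRays m n) b) := by
  induction gs generalizing b S with
  | nil =>
    apply pvInv_congr m n Wp Gp S _ _ h
    intro i j hi hj
    simp
  | cons g rest ih =>
    have hstep := pvGuardRays_inv m n Wp Gp g S b (hgs g (by simp)) h
    have := ih _ _ (fun p hp => hgs p (by simp [hp])) hstep
    apply pvInv_congr m n Wp Gp _ _ _ this
    intro i j hi hj
    simp [Bool.or_assoc]

-- characterizations of the painted sets
lemma pvTW_up_char (p : Int → Bool) (a b x : Int) :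
    (x ∈ (PySem.List.pyRange a b 1).takeWhile p) ↔
      (a ≤ x ∧ x < b ∧ ∀ k, a ≤ k → k ≤ x → p k = true) := by
  induction hd : (b - a).toNat generalizing a with
  | zero =>
    rw [PySem.List.pyRange_one_eq_nil (by omega)]
    simp only [List.takeWhile_nil, List.not_mem_nil, false_iff]
    rintro ⟨h1, h2, -⟩; omega
  | succ d ih =>
    rw [PySem.List.pyRange_one_cons (by omega), List.takeWhile_cons]
    by_cases hpa : p a = true
    · simp only [hpa, if_true, List.mem_cons, ih (a + 1) (by omega)]
      constructor
      · rintro (heq | ⟨h1, h2, h3⟩)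
        · exact ⟨by omega, by omega, fun k hk1 hk2 => by
            have : k = a := by omega
            rw [this]; exact hpa⟩
        · refine ⟨by omega, h2, fun k hk1 hk2 => ?_⟩
          by_cases hka : k = a
          · subst hka; exact hpa
          · exact h3 k (by omega) hk2
      · rintro ⟨h1, h2, h3⟩
        by_cases hxa : x = a
        · exact Or.inl hxa
        · exact Or.inr ⟨by omega, h2, fun k hk1 hk2 => h3 k (by omega) hk2⟩
    · have hpa' : p a = false := by revert hpa; cases p a <;> simp
      simp only [hpa', Bool.false_eq_true, if_false, List.not_mem_nil, false_iff]
      rintro ⟨h1, h2, h3⟩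
      rw [h3 a (le_refl _) h1] at hpa'
      simp at hpa'


lemma pvTW_down_char (p : Int → Bool) (a b x : Int) :
    (x ∈ (PySem.List.pyRange a b (-1)).takeWhile p) ↔
      (b < x ∧ x ≤ a ∧ ∀ k, x ≤ k → k ≤ a → p k = true) := by
  induction hd : (a - b).toNat generalizing a with
  | zero =>
    rw [PySem.List.pyRange_neg_one_eq_nil (by omega)]
    simp only [List.takeWhile_nil, List.not_mem_nil, false_iff]
    rintro ⟨h1, h2, -⟩; omega
  | succ d ih =>
    rw [PySem.List.pyRange_neg_one_cons (by omega), List.takeWhile_cons]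
    by_cases hpa : p a = true
    · simp only [hpa, if_true, List.mem_cons, ih (a - 1) (by omega)]
      constructor
      · rintro (heq | ⟨h1, h2, h3⟩)
        · exact ⟨by omega, by omega, fun k hk1 hk2 => by
            have : k = a := by omega
            rw [this]; exact hpa⟩
        · refine ⟨h1, by omega, fun k hk1 hk2 => ?_⟩
          by_cases hka : k = a
          · subst hka; exact hpa
          · exact h3 k hk1 (by omega)
      · rintro ⟨h1, h2, h3⟩
        by_cases hxa : x = a
        · exact Or.inl hxa
        · exact Or.inr ⟨h1, by omega, fun k hk1 hk2 => h3 k hk1 (by omega)⟩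
    · have hpa' : p a = false := by revert hpa; cases p a <;> simp
      simp only [hpa', Bool.false_eq_true, if_false, List.not_mem_nil, false_iff]
      rintro ⟨h1, h2, h3⟩
      rw [h3 a h2 (le_refl _)] at hpa'
      simp at hpa'


lemma pvTW_col_iff (Wp Gp : List (Int × Int)) (c : Int) (L : List Int) (i j : Int) :
    pvTW (fun ii => (ii, c)) Wp Gp L i j = true ↔
      c = j ∧ i ∈ L.takeWhile (fun t => !pvBlkB Wp Gp t c) := by
  unfold pvTW
  rw [List.any_eq_true]
  constructor
  · rintro ⟨t, ht, hpt⟩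
    simp only [decide_eq_true_eq, Prod.mk.injEq] at hpt
    exact ⟨hpt.2, hpt.1 ▸ ht⟩
  · rintro ⟨rfl, hmem⟩
    exact ⟨i, hmem, by simp⟩

lemma pvTW_row_iff (Wp Gp : List (Int × Int)) (c : Int) (L : List Int) (i j : Int) :
    pvTW (fun jj => (c, jj)) Wp Gp L i j = true ↔
      c = i ∧ j ∈ L.takeWhile (fun t => !pvBlkB Wp Gp c t) := by
  unfold pvTW
  rw [List.any_eq_true]
  constructor
  · rintro ⟨t, ht, hpt⟩
    simp only [decide_eq_true_eq, Prod.mk.injEq] at hpt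
    exact ⟨hpt.1, hpt.2 ▸ ht⟩
  · rintro ⟨rfl, hmem⟩
    exact ⟨j, hmem, by simp⟩

-- one guard's painted set, for an unblocked in-range cell, is exactly B's per-guard test
lemma pvVis_eq_cond (m n : Int) (Wp Gp : List (Int × Int)) (g : Int × Int)
    (hgG : g ∈ Gp) (hg1 : pvInR m g.1) (hg2 : pvInR n g.2) (i j : Int)
    (hi : pvInR m i) (hj : pvInR n j)
    (hnb : pvBlkB Wp Gp i j = false) :
    pvVis m n Wp Gp g i j =
      ((g.1 == i && (PySem.List.pyRange (min g.2 j + 1) (max g.2 j) 1).all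
          (fun k => !pvBlkB Wp Gp i k)) ||
       (g.2 == j && (PySem.List.pyRange (min g.1 i + 1) (max g.1 i) 1).all
          (fun k => !pvBlkB Wp Gp k j))) := by
  obtain ⟨hg10, hg1m⟩ := hg1
  obtain ⟨hg20, hg2n⟩ := hg2
  obtain ⟨hi0, him⟩ := hi
  obtain ⟨hj0, hjn⟩ := hj
  have hne : ¬ (g.1 = i ∧ g.2 = j) := by
    rintro ⟨e1, e2⟩
    have : (i, j) ∈ Gp := by
      have : g = (i, j) := Prod.ext e1 e2
      exact this ▸ hgG
    simp [pvBlkB, this] at hnb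
  rw [Bool.eq_iff_iff]
  unfold pvVis
  simp only [Bool.or_eq_true, Bool.and_eq_true, beq_iff_eq, List.all_eq_true,
    PySem.List.mem_pyRange_one, Bool.not_eq_true']
  rw [pvTW_col_iff, pvTW_col_iff, pvTW_row_iff, pvTW_row_iff,
    pvTW_down_char, pvTW_up_char, pvTW_down_char, pvTW_up_char]
  simp only [Bool.not_eq_true']
  constructor
  · rintro (((⟨rfl, h1, h2, h3⟩ | ⟨rfl, h1, h2, h3⟩) | ⟨rfl, h1, h2, h3⟩) | ⟨rfl, h1, h2, h3⟩)
    · -- up the column: i < g.1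
      refine Or.inr ⟨rfl, fun k hk => ?_⟩
      have hmin : min g.1 i = i := by omega
      have hmax : max g.1 i = g.1 := by omega
      rw [hmin, hmax] at hk
      exact h3 k (by omega) (by omega)
    · -- down the column: g.1 < i
      refine Or.inr ⟨rfl, fun k hk => ?_⟩
      have hmin : min g.1 i = g.1 := by omega
      have hmax : max g.1 i = i := by omega
      rw [hmin, hmax] at hk
      exact h3 k (by omega) (by omega)
    · -- left along the row: j < g.2
      refine Or.inl ⟨rfl, fun k hk => ?_⟩
      have hmin : min g.2 j = j := by omega
      have hmax : max g.2 j = g.2 := by omega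
      rw [hmin, hmax] at hk
      exact h3 k (by omega) (by omega)
    · -- right along the row: g.2 < j
      refine Or.inl ⟨rfl, fun k hk => ?_⟩
      have hmin : min g.2 j = g.2 := by omega
      have hmax : max g.2 j = j := by omega
      rw [hmin, hmax] at hk
      exact h3 k (by omega) (by omega)
  · rintro (⟨heq, hclr⟩ | ⟨heq, hclr⟩)
    · -- B's row test: g.1 = i, cells (i, k)
      rcases lt_trichotomy g.2 j with hlt | heqj | hgt
      · refine Or.inr ⟨heq, by omega, hjn, fun k hk1 hk2 => ?_⟩
        rw [heq]
        by_cases hkj : k = j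
        · subst hkj; exact hnb
        · exact hclr k (by omega)
      · exact absurd ⟨heq, heqj⟩ hne
      · refine Or.inl <| Or.inr ⟨heq, by omega, by omega, fun k hk1 hk2 => ?_⟩
        rw [heq]
        by_cases hkj : k = j
        · subst hkj; exact hnb
        · exact hclr k (by omega)
    · -- B's column test: g.2 = j, cells (k, j)
      rcases lt_trichotomy g.1 i with hlt | heqi | hgt
      · refine Or.inl <| Or.inl <| Or.inr ⟨heq, by omega, him, fun k hk1 hk2 => ?_⟩
        rw [heq]
        by_cases hki : k = i
        · subst hki; exact hnb
        · exact hclr k (by omega)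
      · exact absurd ⟨heqi, heq⟩ hne
      · refine Or.inl <| Or.inl <| Or.inl ⟨heq, by omega, by omega, fun k hk1 hk2 => ?_⟩
        rw [heq]
        by_cases hki : k = i
        · subst hki; exact hnb
        · exact hclr k (by omega)

-- the bridge: for an unblocked in-range cell, being painted by some guard is exactly B's test
lemma pvVis_iff_seen (m n : Int) (guards walls : List (List Int))
    (hpre : Pre_countUnguarded m n guards walls) (i j : Int)
    (hi : pvInR m i) (hj : pvInR n j)
    (hnb : pvBlkB (walls.map pvPair) (guards.map pvPair) i j = false) :
    (guards.any (fun p => pvVis m n (walls.map pvPair) (guards.map pvPair) (pvPair p) i j)) =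
      pvSeen (PySem.Set.ofList (guards.map pvPair))
        (PySem.Set.union (PySem.Set.ofList (walls.map pvPair))
          (PySem.Set.ofList (guards.map pvPair))) i j := by
  have hgb : ∀ p ∈ guards, pvInR m (pvPair p).1 ∧ pvInR n (pvPair p).2 := by
    intro p hp
    obtain ⟨-, h1, h2, h3, h4⟩ := hpre p (by simp [hp])
    exact ⟨⟨h1, h2⟩, ⟨h3, h4⟩⟩
  have hcont : ∀ x : Int × Int,
      PySem.Set.contains (PySem.Set.union (PySem.Set.ofList (walls.map pvPair))
        (PySem.Set.ofList (guards.map pvPair))) x =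
        pvBlkB (walls.map pvPair) (guards.map pvPair) x.1 x.2 := by
    intro x
    rw [Bool.eq_iff_iff, PySem.Set.contains_iff, PySem.Set.mem_union]
    simp [PySem.Set.mem_ofList, pvBlkB]
  rw [Bool.eq_iff_iff, List.any_eq_true]
  unfold pvSeen
  rw [List.any_eq_true]
  constructor
  · rintro ⟨p, hp, hvis⟩
    refine ⟨pvPair p, (PySem.Set.mem_ofList _ _).mpr (List.mem_map_of_mem hp), ?_⟩
    rw [pvVis_eq_cond m n _ _ _ (List.mem_map_of_mem hp) (hgb p hp).1 (hgb p hp).2 i j hi hj hnb]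
      at hvis
    simpa only [hcont] using hvis
  · rintro ⟨g, hgmem, hcond⟩
    obtain ⟨p, hp, rfl⟩ := List.mem_map.mp ((PySem.Set.mem_ofList _ _).mp hgmem)
    refine ⟨p, hp, ?_⟩
    rw [pvVis_eq_cond m n _ _ _ (List.mem_map_of_mem hp) (hgb p hp).1 (hgb p hp).2 i j hi hj hnb]
    simpa only [hcont] using hcond

-- ===== VERDICT (by name: the statement is the Claim_ definition above) =====
theorem countUnguarded_spec : Claim_equal_countUnguarded := by
  intro m n guards walls _ hpre
  show countUnguarded m n guards walls = countUnguarded_alt m n guards walls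
  have hgb : ∀ p ∈ guards, pvInR m (pvPair p).1 ∧ pvInR n (pvPair p).2 := by
    intro p hp
    obtain ⟨-, h1, h2, h3, h4⟩ := hpre p (by simp [hp])
    exact ⟨⟨h1, h2⟩, ⟨h3, h4⟩⟩
  have hinv := pvInv_congr m n (walls.map pvPair) (guards.map pvPair) _
    (fun i j => guards.any fun p =>
      pvVis m n (walls.map pvPair) (guards.map pvPair) (pvPair p) i j) _
    (pvFold_inv m n (walls.map pvPair) (guards.map pvPair) guards _ _ hgb
      (pvInv_init m n guards walls hpre))
    (fun i j _ _ => by simp)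
  obtain ⟨⟨hlen, hrows⟩, hpt⟩ := hinv
  have hcell : ∀ (i j : Int), pvInR m i → pvInR n j →
      ((!(PySem.Set.contains (PySem.Set.union (PySem.Set.ofList (walls.map pvPair))
            (PySem.Set.ofList (guards.map pvPair))) (i, j)) &&
        !(pvSeen (PySem.Set.ofList (guards.map pvPair))
            (PySem.Set.union (PySem.Set.ofList (walls.map pvPair))
              (PySem.Set.ofList (guards.map pvPair))) i j))) =
        (pvCell (walls.map pvPair) (guards.map pvPair)
          (fun i j => guards.any fun p =>
            pvVis m n (walls.map pvPair) (guards.map pvPair) (pvPair p) i j) i j == "") := by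
    intro i j hi hj
    have hcont : PySem.Set.contains (PySem.Set.union (PySem.Set.ofList (walls.map pvPair))
        (PySem.Set.ofList (guards.map pvPair))) (i, j) =
        pvBlkB (walls.map pvPair) (guards.map pvPair) i j := by
      rw [Bool.eq_iff_iff, PySem.Set.contains_iff, PySem.Set.mem_union]
      simp [PySem.Set.mem_ofList, pvBlkB]
    by_cases hblk : pvBlkB (walls.map pvPair) (guards.map pvPair) i j = true
    · rw [hcont, hblk]
      simp only [Bool.not_true, Bool.false_and]
      simp only [pvBlkB, Bool.or_eq_true, decide_eq_true_eq] at hblk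
      rcases hblk with hW | hG
      · by_cases hG' : (i, j) ∈ guards.map pvPair <;> simp [pvCell, hW, hG']
      · simp [pvCell, hG]
    · have hblk' : pvBlkB (walls.map pvPair) (guards.map pvPair) i j = false := by
        revert hblk; cases pvBlkB (walls.map pvPair) (guards.map pvPair) i j <;> simp
      rw [hcont, hblk']
      simp only [Bool.not_false, Bool.true_and]
      rw [← pvVis_iff_seen m n guards walls hpre i j hi hj hblk']
      simp only [pvBlkB, Bool.or_eq_true, decide_eq_true_eq] at hblk
      push Not at hblk
      simp only [pvCell, if_neg hblk.2, if_neg hblk.1]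
      rcases Bool.eq_false_or_eq_true (guards.any fun p =>
          pvVis m n (walls.map pvPair) (guards.map pvPair) (pvPair p) i j) with hany | hany <;>
        simp [hany]
  unfold countUnguarded countUnguarded_alt
  simp only []
  have hb3 : guards.foldl (pvGuardRays m n)
      (guards.foldl
        (fun b p => pvSet2 b (PySem.List.pyGetD p 0 0) (PySem.List.pyGetD p 1 0) "G")
        (walls.foldl
          (fun b p => pvSet2 b (PySem.List.pyGetD p 0 0) (PySem.List.pyGetD p 1 0) "W")
          ((PySem.List.pyRange 0 m 1).map
            (fun _ => (PySem.List.pyRange 0 n 1).map (fun _ => ""))))) =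
      (List.range m.toNat).map (fun (i : Nat) => (List.range n.toNat).map (fun (j : Nat) =>
        pvCell (walls.map pvPair) (guards.map pvPair)
          (fun i j => guards.any fun p =>
            pvVis m n (walls.map pvPair) (guards.map pvPair) (pvPair p) i j) ((i : Nat) : Int) ((j : Nat) : Int))) := by
    apply List.ext_getElem
    · rw [hlen]; simp
    · intro k hk1 hk2
      apply List.ext_getElem
      · rw [hrows _ (List.getElem_mem hk1)]; simp
      · intro l hl1 hl2
        have hkm : ((k : Int)) < m := by
          have := hk1; rw [hlen] at this; omega
        have hln : ((l : Int)) < n := by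
          have := hrows _ (List.getElem_mem hk1); rw [this] at hl1; omega
        have hent := hpt (k : Int) (l : Int) ⟨by positivity, hkm⟩ ⟨by positivity, hln⟩
        rw [pvGet2, PySem.List.pyGetD_natCast, PySem.List.pyGetD_natCast,
          List.getD_eq_getElem _ _ hk1, List.getD_eq_getElem _ _ hl1] at hent
        rw [hent]
        simp
  rw [hb3, PySem.List.pyRange_zero, PySem.List.pyRange_zero, List.map_map, List.map_map]
  simp only [List.map_map, Function.comp_def, PySem.List.count_eq, List.count_eq_countP,
    List.countP_map, PySem.List.sum_map_ite_one_zero]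
  apply congrArg
  apply List.map_congr_left
  intro k hk
  apply congrArg
  apply List.countP_congr
  intro l hl
  rw [List.mem_range] at hk hl
  have hkm : ((k : Int)) < m := by omega
  have hln : ((l : Int)) < n := by omega
  rw [(hcell (k : Int) (l : Int) ⟨by positivity, hkm⟩ ⟨by positivity, hln⟩).symm]
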